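-- pv_equiv track=rewrite | github.com/LvcidPsyche/webreaper | webreaper/modules/ghost.py | _is_soft_block
-- ===== SOURCE A (Python) =====
-- def _is_soft_block(body: str) -> bool:
--     """Detect soft blocks (200 OK but blocking content)."""
--     block_phrases = [
--         "access denied", "please verify you are human",
--         "automated access", "bot detected", "unusual traffic",
--         "please complete the security check",
--     ]
--     body_lower = body.lower()
--     return any(phrase in body_lower for phrase in block_phrases)
-- ===== SOURCE B (Python) =====
-- BLOCK_PHRASES = [
--     "access denied", "please verify you are human",
--     "automated access", "bot detected", "unusual traffic",
--     "please complete the security check",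
-- ]
--
-- def _is_soft_block(body: str) -> bool:
--     """Detect soft blocks (200 OK but blocking content)."""
--     s = body.lower()
--     for i in range(len(s)):
--         if any(s.startswith(p, i) for p in BLOCK_PHRASES):
--             return True
--     return False
-- ===== Notes on version B (the rewrite author's own statement) =====
-- stated objective: alternative
-- what changed: Replaces six independent full-text substring searches (phrase-major 'in' scans) with a single left-to-right position-major sweep that tests every phrase as a prefix at each position and short-circuits at the first hit.
import Mathlib
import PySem

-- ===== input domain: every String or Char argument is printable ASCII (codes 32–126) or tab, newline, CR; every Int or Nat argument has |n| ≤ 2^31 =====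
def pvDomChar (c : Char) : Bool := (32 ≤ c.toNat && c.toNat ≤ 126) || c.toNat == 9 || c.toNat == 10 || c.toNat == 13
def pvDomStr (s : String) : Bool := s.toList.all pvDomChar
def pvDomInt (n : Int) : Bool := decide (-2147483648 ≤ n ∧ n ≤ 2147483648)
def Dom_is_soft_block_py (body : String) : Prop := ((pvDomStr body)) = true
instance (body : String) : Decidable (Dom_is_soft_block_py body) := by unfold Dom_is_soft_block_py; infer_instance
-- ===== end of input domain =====

-- B replaces A's six phrase-major substring scans with one position-major sweep
-- testing every phrase as a prefix at each index (objective: alternative; same cost).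

-- ===== PORT A =====
-- literal port of _is_soft_block: lowercase once, then any(phrase in body_lower …)
def is_soft_block_py (body : String) : Bool :=
  let block_phrases : List String :=
    ["access denied", "please verify you are human",
     "automated access", "bot detected", "unusual traffic",
     "please complete the security check"]
  let body_lower := PySem.Str.lower body
  block_phrases.any (fun phrase => PySem.Str.isIn phrase body_lower)

-- ===== PORT B =====
-- Source B's loop `for i in range(len(s)): if any(s.startswith(p, i) …)` as structural
-- recursion over the successive suffixes of the lowered character list.
def pvScan (phrases : List (List Char)) : List Char → Bool
  | [] => false
  | c :: rest =>
    (phrases.any (fun p => PySem.Chars.startswith (c :: rest) p)) || pvScan phrases rest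

def is_soft_block_py_alt (body : String) : Bool :=
  let phrases : List String :=
    ["access denied", "please verify you are human",
     "automated access", "bot detected", "unusual traffic",
     "please complete the security check"]
  let s := PySem.Str.lower body
  pvScan (phrases.map String.toList) s.toList

-- ===== PRECONDITION & SPEC =====
def Spec_is_soft_block_py (body : String) (out : Bool) : Prop := out = is_soft_block_py_alt body
instance (body : String) (out : Bool) : Decidable (Spec_is_soft_block_py body out) := by unfold Spec_is_soft_block_py; infer_instance

-- ===== CLAIM (what is proved, stated in full; the proofs are below) =====
def Claim_equal_is_soft_block_py : Prop := ∀ (body : String), Dom_is_soft_block_py body → Spec_is_soft_block_py body (is_soft_block_py body)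

-- ===== LEMMAS AND PROOFS =====

-- the position-major sweep fires iff some phrase is a prefix of some nonempty suffix
lemma pvScan_true_iff (phrases : List (List Char)) (s : List Char) :
    pvScan phrases s = true ↔ ∃ p ∈ phrases, ∃ i, i < s.length ∧ p <+: s.drop i := by
  induction s with
  | nil => simp [pvScan]
  | cons c rest ih =>
    simp only [pvScan, Bool.or_eq_true, List.any_eq_true, ih, PySem.Chars.startswith_iff]
    constructor
    · rintro (⟨p, hp, hpre⟩ | ⟨p, hp, i, hi, hpre⟩)
      · exact ⟨p, hp, 0, by simp, by simpa using hpre⟩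
      · exact ⟨p, hp, i + 1, by simpa using Nat.succ_lt_succ hi, by simpa using hpre⟩
    · rintro ⟨p, hp, i, hi, hpre⟩
      cases i with
      | zero => exact Or.inl ⟨p, hp, by simpa using hpre⟩
      | succ j =>
        exact Or.inr ⟨p, hp, j, by simpa using Nat.lt_of_succ_lt_succ hi, by simpa using hpre⟩

-- a NONEMPTY pattern is a substring iff it is a prefix of a suffix starting before the end
lemma isIn_iff_scan_side (p s : List Char) (hp : p ≠ []) :
    PySem.Chars.isIn p s = true ↔ ∃ i, i < s.length ∧ p <+: s.drop i := by
  rw [← PySem.Chars.exists_prefix_drop_iff_isIn]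
  constructor
  · rintro ⟨j, hj⟩
    by_cases h : j < s.length
    · exact ⟨j, h, hj⟩
    · exfalso
      have : s.drop j = [] := List.drop_eq_nil_of_le (Nat.le_of_not_lt h)
      rw [this] at hj
      exact hp (List.prefix_nil.mp hj)
  · rintro ⟨i, _, hpre⟩; exact ⟨i, hpre⟩

-- ===== VERDICT (by name: the statement is the Claim_ definition above) =====
theorem is_soft_block_py_spec : Claim_equal_is_soft_block_py := by
  intro body _
  unfold Spec_is_soft_block_py is_soft_block_py is_soft_block_py_alt
  simp only [List.any_cons, List.any_nil, List.map, PySem.Str.isIn_eq]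
  rw [Bool.eq_iff_iff]
  simp only [Bool.or_eq_true, Bool.false_eq_true, or_false]
  rw [pvScan_true_iff]
  simp only [List.mem_cons, List.not_mem_nil, or_false, exists_eq_or_imp, exists_eq_left]
  rw [isIn_iff_scan_side, isIn_iff_scan_side, isIn_iff_scan_side,
      isIn_iff_scan_side, isIn_iff_scan_side, isIn_iff_scan_side] <;> simp
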